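-- pv_equiv track=rewrite | github.com/DJH0727/OpinionAnalysis | doc_project/generater.py | generate_ner_html_str
-- ===== SOURCE A (Python) =====
-- ner_color_map = {
--     'PERSON': '#ffadad',       # 人名
--     'LOCATION': '#ffd6a5',     # 地点
--     'ORGANIZATION': '#9bf6ff', # 机构名
--     'DATE': '#caffbf',         # 时间
--     'O': '#ffffff'             # 非实体
-- }
--
-- def generate_ner_html_str(tokens, tags, max_tokens=200):
--     html_parts = []
--
--     # 限制显示数量
--     tokens = tokens[:max_tokens]
--     tags = tags[:max_tokens]
--
--     i = 0
--     while i < len(tokens):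
--         tag = tags[i]
--         if tag.startswith("B-"):
--             ent_type = tag[2:]
--             color = ner_color_map.get(ent_type, '#e0e0e0')
--             entity_tokens = [tokens[i]]
--             i += 1
--             while i < len(tokens) and tags[i] == f"I-{ent_type}":
--                 entity_tokens.append(tokens[i])
--                 i += 1
--             entity_text = "".join(entity_tokens)
--             html_parts.append(
--                 f'<span style="background-color:{color};padding:2px 4px;border-radius:4px;margin:1px;" '
--                 f'title="{ent_type}">{entity_text}</span>'
--             )
--         else:
--             html_parts.append(tokens[i])
--             i += 1
--
--     return generate_ner_legend_html_str() + '<div>' + ' '.join(html_parts) + '</div>'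
--
-- def generate_ner_legend_html_str():
--     # 图例说明部分
--     legend_parts = ['<div style="margin-bottom:10px;"><strong>实体类型图例：</strong>']
--     tag_name_map = {
--         'PERSON': '人名',
--         'LOCATION': '地点',
--         'ORGANIZATION': '机构',
--         'DATE': '时间'
--     }
--     for ent_type, color in ner_color_map.items():
--         if ent_type == 'O':
--             continue
--         name = tag_name_map.get(ent_type, ent_type)
--         legend_parts.append(
--             f'<span style="background-color:{color};padding:2px 6px;margin-right:5px;'
--             f'border-radius:4px;display:inline-block;" title="{ent_type}">{name}</span>'
--         )
--     legend_parts.append('</div>')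
--     return ''.join(legend_parts)
-- ===== SOURCE B (Python) =====
-- ner_color_map = {
--     'PERSON': '#ffadad',
--     'LOCATION': '#ffd6a5',
--     'ORGANIZATION': '#9bf6ff',
--     'DATE': '#caffbf',
--     'O': '#ffffff'
-- }
--
--
-- def generate_ner_html_str(tokens, tags, max_tokens=200):
--     toks = tokens[:max_tokens]
--     tgs = tags[:max_tokens]
--
--     # Pass 1: group the (token, tag) stream into segments.
--     # A segment is (ent_type, text) for an entity opened by a B- tag and
--     # extended by consecutive matching I- tags, or (None, token) for a raw token.
--     segments = []          # finished segments
--     current = None         # the entity segment still open, or None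
--     for i in range(len(toks)):
--         tok, tag = toks[i], tgs[i]   # IndexError if tags are shorter, as in A
--         if tag.startswith("B-"):
--             if current is not None:
--                 segments.append(current)
--             current = (tag[2:], tok)
--         elif current is not None and tag == "I-" + current[0]:
--             current = (current[0], current[1] + tok)
--         else:
--             if current is not None:
--                 segments.append(current)
--                 current = None
--             segments.append((None, tok))
--     if current is not None:
--         segments.append(current)
--
--     # Pass 2: render each segment.
--     parts = [
--         tok if ty is None else
--         f'<span style="background-color:{ner_color_map.get(ty, "#e0e0e0")};padding:2px 4px;border-radius:4px;margin:1px;" '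
--         f'title="{ty}">{tok}</span>'
--         for ty, tok in segments
--     ]
--     return generate_ner_legend_html_str() + '<div>' + ' '.join(parts) + '</div>'
--
--
-- def generate_ner_legend_html_str():
--     tag_name_map = {
--         'PERSON': '人名',
--         'LOCATION': '地点',
--         'ORGANIZATION': '机构',
--         'DATE': '时间'
--     }
--     spans = ''.join(
--         f'<span style="background-color:{color};padding:2px 6px;margin-right:5px;'
--         f'border-radius:4px;display:inline-block;" title="{ent_type}">{tag_name_map.get(ent_type, ent_type)}</span>'
--         for ent_type, color in ner_color_map.items() if ent_type != 'O'
--     )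
--     return '<div style="margin-bottom:10px;"><strong>实体类型图例：</strong>' + spans + '</div>'
-- ===== Notes on version B (the rewrite author's own statement) =====
-- stated objective: alternative
-- what changed: Replaces A's single interleaved while-loop with a nested inner while (manual index jumps) by a two-phase design: one linear fold that groups the token/tag stream into entity/raw segments via a small state machine, then a separate pass rendering each segment to HTML.
import Mathlib
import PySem

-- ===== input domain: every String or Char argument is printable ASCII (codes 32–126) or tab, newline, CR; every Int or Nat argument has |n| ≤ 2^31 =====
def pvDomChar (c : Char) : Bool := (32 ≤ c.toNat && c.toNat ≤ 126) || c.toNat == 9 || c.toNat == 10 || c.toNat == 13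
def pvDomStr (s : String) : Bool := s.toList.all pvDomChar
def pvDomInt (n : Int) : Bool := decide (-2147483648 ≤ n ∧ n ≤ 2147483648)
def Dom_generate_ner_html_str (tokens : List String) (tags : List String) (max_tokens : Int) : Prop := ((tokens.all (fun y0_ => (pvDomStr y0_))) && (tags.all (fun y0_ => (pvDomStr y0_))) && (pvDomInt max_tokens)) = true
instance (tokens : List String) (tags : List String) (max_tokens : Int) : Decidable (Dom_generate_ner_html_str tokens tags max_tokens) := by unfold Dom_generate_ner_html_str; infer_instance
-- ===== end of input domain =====

-- B re-decomposes A's interleaved index/while scan into a grouping fold (segments) plus a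
-- separate rendering pass; same return value (and same IndexError domain) as A; objective: alternative decomposition.

-- ===== PORT A =====

def nerColorMapA : PySem.Dict String String :=
  PySem.Dict.ofList [("PERSON", "#ffadad"), ("LOCATION", "#ffd6a5"),
                     ("ORGANIZATION", "#9bf6ff"), ("DATE", "#caffbf"), ("O", "#ffffff")]

-- the entity span f-string of A
def spanA (color ty text : String) : String :=
  "<span style=\"background-color:" ++ color ++ ";padding:2px 4px;border-radius:4px;margin:1px;\" title=\"" ++ ty ++ "\">" ++ text ++ "</span>"

-- the legend span f-string of A
def legendSpanA (color ty name : String) : String :=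
  "<span style=\"background-color:" ++ color ++ ";padding:2px 6px;margin-right:5px;border-radius:4px;display:inline-block;\" title=\"" ++ ty ++ "\">" ++ name ++ "</span>"

-- generate_ner_legend_html_str of A: list of parts built by a fold over the dict items, then ''.join
def legendA : String :=
  let tag_name_map : PySem.Dict String String :=
    PySem.Dict.ofList [("PERSON", "人名"), ("LOCATION", "地点"), ("ORGANIZATION", "机构"), ("DATE", "时间")]
  let legend_parts : List String := ["<div style=\"margin-bottom:10px;\"><strong>实体类型图例：</strong>"]
  let legend_parts := nerColorMapA.items.foldl (fun acc p =>
    if p.1 = "O" then acc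
    else acc ++ [legendSpanA p.2 p.1 (PySem.Dict.getD tag_name_map p.1 p.1)]) legend_parts
  let legend_parts := legend_parts ++ ["</div>"]
  PySem.Str.join "" legend_parts

-- the inner while loop of A: collects the entity continuation tokens and returns the
-- remaining (tokens, tags) suffixes (tokens and tags advance in lockstep with index i)
def collectA (ty : String) : List String → List String → List String × List String × List String
  | t :: ts, g :: gs =>
    if g = "I-" ++ ty then
      let r := collectA ty ts gs
      (t :: r.1, r.2.1, r.2.2)
    else ([], t :: ts, g :: gs)
  | ts, gs => ([], ts, gs)

theorem collectA_len (ty : String) (ts gs : List String) :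
    (collectA ty ts gs).2.1.length ≤ ts.length := by
  induction ts generalizing gs with
  | nil => cases gs <;> simp [collectA]
  | cons t ts ih =>
    cases gs with
    | nil => simp [collectA]
    | cons g gs =>
      simp only [collectA]
      split
      · have := ih gs; simp only [List.length_cons]; omega
      · simp

-- the outer while loop of A, producing html_parts (on mismatched lengths Python A raises
-- IndexError; those inputs are outside Pre_ below, where the port just stops)
def loopA : List String → List String → List String
  | t :: ts, g :: gs =>
    if PySem.Str.startswith g "B-" then
      let ty := PySem.Str.slice g (some 2) none
      let color := PySem.Dict.getD nerColorMapA ty "#e0e0e0"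
      let r := collectA ty ts gs
      spanA color ty (PySem.Str.join "" (t :: r.1)) :: loopA r.2.1 r.2.2
    else
      t :: loopA ts gs
  | _, _ => []
termination_by ts gs => ts.length
decreasing_by
  · have := collectA_len (PySem.Str.slice g (some 2) none) ts gs; simp; omega
  · simp

def generate_ner_html_str (tokens : List String) (tags : List String) (max_tokens : Int) : String :=
  let tokens := PySem.List.slice tokens none (some max_tokens)
  let tags := PySem.List.slice tags none (some max_tokens)
  legendA ++ "<div>" ++ PySem.Str.join " " (loopA tokens tags) ++ "</div>"

-- ===== PORT B =====

def nerColorMapB : PySem.Dict String String :=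
  PySem.Dict.ofList [("PERSON", "#ffadad"), ("LOCATION", "#ffd6a5"),
                     ("ORGANIZATION", "#9bf6ff"), ("DATE", "#caffbf"), ("O", "#ffffff")]

def spanB (color ty text : String) : String :=
  "<span style=\"background-color:" ++ color ++ ";padding:2px 4px;border-radius:4px;margin:1px;\" title=\"" ++ ty ++ "\">" ++ text ++ "</span>"

def legendSpanB (color ty name : String) : String :=
  "<span style=\"background-color:" ++ color ++ ";padding:2px 6px;margin-right:5px;border-radius:4px;display:inline-block;\" title=\"" ++ ty ++ "\">" ++ name ++ "</span>"

-- generate_ner_legend_html_str of B: filter + map + ''.join, concatenated between the two wrapper strings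
def legendB : String :=
  let tag_name_map : PySem.Dict String String :=
    PySem.Dict.ofList [("PERSON", "人名"), ("LOCATION", "地点"), ("ORGANIZATION", "机构"), ("DATE", "时间")]
  let spans := PySem.Str.join "" ((nerColorMapB.items.filter (fun p => p.1 ≠ "O")).map
    (fun p => legendSpanB p.2 p.1 (PySem.Dict.getD tag_name_map p.1 p.1)))
  "<div style=\"margin-bottom:10px;\"><strong>实体类型图例：</strong>" ++ spans ++ "</div>"

-- 'segments.append(current) if current is not None'
def flushSeg : Option (String × String) → List (Option String × String)
  | some c => [(some c.1, c.2)]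
  | none => []

-- the body of B's grouping loop; state = (finished segments, open entity segment)
def stepB (st : List (Option String × String) × Option (String × String)) (p : String × String) :
    List (Option String × String) × Option (String × String) :=
  if PySem.Str.startswith p.2 "B-" then
    (st.1 ++ flushSeg st.2, some (PySem.Str.slice p.2 (some 2) none, p.1))
  else
    match st.2 with
    | some c =>
      if p.2 = "I-" ++ c.1 then (st.1, some (c.1, c.2 ++ p.1))
      else (st.1 ++ [(some c.1, c.2), (none, p.1)], none)
    | none => (st.1 ++ [(none, p.1)], none)

-- pass 1 of B: 'for i in range(len(toks)): … toks[i], tgs[i] …' folded into segments;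
-- tgs[i] is ported with pyGetD (exact on Pre_, where the index is always in range —
-- outside Pre_ Python B raises IndexError), then the still-open entity is flushed
def segsB (toks tgs : List String) : List (Option String × String) :=
  let r := (PySem.List.pyRange 0 (toks.length : Int) 1).foldl
    (fun st i => stepB st (PySem.List.pyGetD toks i "", PySem.List.pyGetD tgs i "")) ([], none)
  r.1 ++ flushSeg r.2

-- pass 2: render one segment
def renderB : Option String × String → String
  | (none, tok) => tok
  | (some ty, txt) => spanB (PySem.Dict.getD nerColorMapB ty "#e0e0e0") ty txt

def generate_ner_html_str_alt (tokens : List String) (tags : List String) (max_tokens : Int) : String :=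
  let segments := segsB (PySem.List.slice tokens none (some max_tokens))
                        (PySem.List.slice tags none (some max_tokens))
  legendB ++ "<div>" ++ PySem.Str.join " " (segments.map renderB) ++ "</div>"

-- ===== PRECONDITION & SPEC =====

-- Pre_ excludes exactly the inputs where the truncated tag list is shorter than the truncated
-- token list: there both Python A and Python B raise IndexError at tags[i].
def Pre_generate_ner_html_str (tokens : List String) (tags : List String) (max_tokens : Int) : Prop :=
  (PySem.List.slice tokens none (some max_tokens)).length ≤ (PySem.List.slice tags none (some max_tokens)).length

instance (tokens : List String) (tags : List String) (max_tokens : Int) : Decidable (Pre_generate_ner_html_str tokens tags max_tokens) := by unfold Pre_generate_ner_html_str; infer_instance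

def pvWitness_generate_ner_html_str : List String × List String × Int :=
  (["Alice", "met", "Bob", "Smith", "in", "Paris"],
   ["B-PERSON", "O", "B-PERSON", "I-PERSON", "O", "B-LOCATION"], 200)

def Spec_generate_ner_html_str (tokens : List String) (tags : List String) (max_tokens : Int) (out : String) : Prop := out = generate_ner_html_str_alt tokens tags max_tokens
instance (tokens : List String) (tags : List String) (max_tokens : Int) (out : String) : Decidable (Spec_generate_ner_html_str tokens tags max_tokens out) := by unfold Spec_generate_ner_html_str; infer_instance

-- ===== CLAIM (what is proved, stated in full; the proofs are below) =====
def Claim_equal_generate_ner_html_str : Prop := ∀ (tokens : List String) (tags : List String) (max_tokens : Int), Dom_generate_ner_html_str tokens tags max_tokens → Pre_generate_ner_html_str tokens tags max_tokens → Spec_generate_ner_html_str tokens tags max_tokens (generate_ner_html_str tokens tags max_tokens)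

-- ===== LEMMAS AND PROOFS =====

-- B's index fold reads exactly the zipped stream when the tags cover the tokens
theorem segsB_eq_zip (toks tgs : List String) (h : toks.length ≤ tgs.length) :
    segsB toks tgs =
      ((toks.zip tgs).foldl stepB ([], none)).1 ++
        flushSeg ((toks.zip tgs).foldl stepB ([], none)).2 := by
  have hmap : (PySem.List.pyRange 0 (toks.length : Int) 1).map
      (fun i => (PySem.List.pyGetD toks i "", PySem.List.pyGetD tgs i "")) = toks.zip tgs := by
    apply List.ext_getElem
    · simp [PySem.List.length_pyRange_one]; omega
    · intro k h1 h2
      have hk : k < toks.length := by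
        simpa [PySem.List.length_pyRange_one] using h1
      have hk2 : k < tgs.length := by omega
      rw [List.getElem_map, PySem.List.getElem_pyRange_one]
      simp [PySem.List.pyGetD_natCast, List.getD_eq_getElem?_getD, hk, hk2, List.getElem_zip]
  unfold segsB
  rw [← hmap, List.foldl_map]

-- ghost: the segment list A's loop renders (same recursion as loopA, before formatting)
def segsA : List String → List String → List (Option String × String)
  | t :: ts, g :: gs =>
    if PySem.Str.startswith g "B-" then
      let ty := PySem.Str.slice g (some 2) none
      let r := collectA ty ts gs
      (some ty, PySem.Str.join "" (t :: r.1)) :: segsA r.2.1 r.2.2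
    else
      (none, t) :: segsA ts gs
  | _, _ => []
termination_by ts gs => ts.length
decreasing_by
  · have := collectA_len (PySem.Str.slice g (some 2) none) ts gs; simp; omega
  · simp

theorem collectA_nil (ty : String) (gs : List String) : collectA ty [] gs = ([], [], gs) := by
  cases gs <;> simp [collectA]

theorem collectA_cons (ty t g : String) (ts gs : List String) :
    collectA ty (t :: ts) (g :: gs) =
      if g = "I-" ++ ty then
        (t :: (collectA ty ts gs).1, (collectA ty ts gs).2.1, (collectA ty ts gs).2.2)
      else ([], t :: ts, g :: gs) := by
  simp only [collectA]

theorem segsA_nil (gs : List String) : segsA [] gs = [] := by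
  cases gs <;> simp [segsA]

theorem segsA_cons_B (t g : String) (ts gs : List String)
    (hB : PySem.Str.startswith g "B-" = true) :
    segsA (t :: ts) (g :: gs) =
      (some (PySem.Str.slice g (some 2) none),
        PySem.Str.join "" (t :: (collectA (PySem.Str.slice g (some 2) none) ts gs).1)) ::
        segsA (collectA (PySem.Str.slice g (some 2) none) ts gs).2.1
              (collectA (PySem.Str.slice g (some 2) none) ts gs).2.2 := by
  have hB' : PySem.Chars.startswith g.toList ['B', '-'] = true := by simpa using hB
  simp [segsA, hB']

theorem segsA_cons_raw (t g : String) (ts gs : List String)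
    (hB : PySem.Str.startswith g "B-" = false) :
    segsA (t :: ts) (g :: gs) = (none, t) :: segsA ts gs := by
  have hB' : PySem.Chars.startswith g.toList ['B', '-'] = false := by simpa using hB
  simp [segsA, hB']

theorem join_empty_cons (t : String) (l : List String) :
    PySem.Str.join "" (t :: l) = t ++ PySem.Str.join "" l := by
  rcases l with _ | ⟨a, l⟩ <;>
    simp [PySem.Str.join, PySem.Chars.join_nil, PySem.Chars.join_cons_cons, PySem.Chars.join_singleton]

theorem join_empty_nil : PySem.Str.join "" ([] : List String) = "" := by
  simp [PySem.Str.join, PySem.Chars.join_nil]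

-- a tag starting with "B-" is never an "I-…" continuation tag
theorem startB_ne_I (g ty : String) (h : PySem.Str.startswith g "B-" = true) : g ≠ "I-" ++ ty := by
  intro hg
  subst hg
  rw [PySem.Str.startswith_eq] at h
  rw [PySem.Chars.startswith_iff] at h
  simp [String.toList_append] at h

-- rendering A's loop output = mapping renderB over A's segment list
theorem loopA_eq_map : ∀ (n : Nat) (ts gs : List String), ts.length ≤ n →
    loopA ts gs = (segsA ts gs).map renderB
  | _, [], gs, _ => by cases gs <;> simp [loopA, segsA]
  | _, t :: ts, [], _ => by simp [loopA, segsA]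
  | n + 1, t :: ts, g :: gs, h => by
    have hlen : ts.length ≤ n := by simp at h; omega
    cases hB : PySem.Str.startswith g "B-" with
    | true =>
      have hr := collectA_len (PySem.Str.slice g (some 2) none) ts gs
      have hB' : PySem.Chars.startswith g.toList ['B', '-'] = true := by simpa using hB
      rw [segsA_cons_B t g ts gs hB]
      rw [show loopA (t :: ts) (g :: gs) =
          spanA (PySem.Dict.getD nerColorMapA (PySem.Str.slice g (some 2) none) "#e0e0e0")
            (PySem.Str.slice g (some 2) none)
            (PySem.Str.join "" (t :: (collectA (PySem.Str.slice g (some 2) none) ts gs).1)) ::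
          loopA (collectA (PySem.Str.slice g (some 2) none) ts gs).2.1
                (collectA (PySem.Str.slice g (some 2) none) ts gs).2.2 by
        simp [loopA, hB']]
      rw [loopA_eq_map n _ _ (by omega), List.map_cons]
      rfl
    | false =>
      have hB' : PySem.Chars.startswith g.toList ['B', '-'] = false := by simpa using hB
      rw [segsA_cons_raw t g ts gs hB]
      rw [show loopA (t :: ts) (g :: gs) = t :: loopA ts gs by simp [loopA, hB']]
      rw [loopA_eq_map n ts gs hlen, List.map_cons]
      rfl

def finishB (st : List (Option String × String) × Option (String × String)) :
    List (Option String × String) := st.1 ++ flushSeg st.2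

-- what A's loop does from an intermediate state: an open entity (ty, txt) absorbs the
-- tokens collectA collects, then the closed loop continues
def afterA : Option (String × String) → List String → List String → List (Option String × String)
  | none, ts, gs => segsA ts gs
  | some c, ts, gs =>
    (some c.1, c.2 ++ PySem.Str.join "" (collectA c.1 ts gs).1) ::
      segsA (collectA c.1 ts gs).2.1 (collectA c.1 ts gs).2.2

-- the loop invariant: B's fold from state (segs, cur) finishes to segs ++ afterA cur ts gs
theorem foldB_inv : ∀ (n : Nat) (ts gs : List String)
    (segs : List (Option String × String)) (cur : Option (String × String)),
    ts.length ≤ n → ts.length ≤ gs.length →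
    finishB ((ts.zip gs).foldl stepB (segs, cur)) = segs ++ afterA cur ts gs
  | _, [], gs, segs, cur, _, _ => by
    rcases cur with _ | ⟨ty, txt⟩ <;>
      simp [finishB, flushSeg, afterA, segsA_nil, collectA_nil, join_empty_nil,
        String.append_empty]
  | _, t :: ts, [], segs, cur, _, h2 => by simp at h2
  | n + 1, t :: ts, g :: gs, segs, cur, h, h2 => by
    have hlen : ts.length ≤ n := by simp at h; omega
    have hlen2 : ts.length ≤ gs.length := by simp at h2; omega
    rw [List.zip_cons_cons, List.foldl_cons]
    cases hB : PySem.Str.startswith g "B-" with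
    | true =>
      have hB' : PySem.Chars.startswith g.toList ['B', '-'] = true := by simpa using hB
      rw [show stepB (segs, cur) (t, g) =
          (segs ++ flushSeg cur, some (PySem.Str.slice g (some 2) none, t)) by
            simp [stepB, hB']]
      rw [foldB_inv n ts gs _ _ hlen hlen2]
      rcases cur with _ | ⟨ty, txt⟩
      · simp only [flushSeg, List.append_nil, afterA]
        rw [segsA_cons_B t g ts gs hB, join_empty_cons]
      · have hne : g ≠ "I-" ++ ty := startB_ne_I g ty hB
        simp only [flushSeg, afterA]
        rw [collectA_cons, if_neg hne, segsA_cons_B t g ts gs hB, join_empty_cons,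
          join_empty_nil, String.append_empty]
        simp
    | false =>
      have hB' : PySem.Chars.startswith g.toList ['B', '-'] = false := by simpa using hB
      rcases cur with _ | ⟨ty, txt⟩
      · rw [show stepB (segs, none) (t, g) = (segs ++ [(none, t)], none) by
            simp [stepB, hB']]
        rw [foldB_inv n ts gs _ _ hlen hlen2]
        simp only [flushSeg, afterA]
        rw [segsA_cons_raw t g ts gs hB]
        simp
      · by_cases hI : g = "I-" ++ ty
        · rw [show stepB (segs, some (ty, txt)) (t, g) = (segs, some (ty, txt ++ t)) by
              simp [stepB, hB']; simp [hI]]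
          rw [foldB_inv n ts gs _ _ hlen hlen2]
          simp only [afterA]
          rw [collectA_cons, if_pos hI, join_empty_cons, ← String.append_assoc]
        · rw [show stepB (segs, some (ty, txt)) (t, g) =
              (segs ++ [(some ty, txt), (none, t)], none) by
                simp [stepB, hB']; simp [hI]]
          rw [foldB_inv n ts gs _ _ hlen hlen2]
          simp only [flushSeg, afterA]
          rw [collectA_cons, if_neg hI, segsA_cons_raw t g ts gs hB,
            join_empty_nil, String.append_empty]
          simp

set_option maxRecDepth 8192 in
set_option maxHeartbeats 2000000 in
theorem legendA_eq_legendB : legendA = legendB := by decide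

-- ===== VERDICT (by name: the statement is the Claim_ definition above) =====
theorem generate_ner_html_str_spec : Claim_equal_generate_ner_html_str := by
  intro tokens tags max_tokens _hDom hPre
  show generate_ner_html_str tokens tags max_tokens = generate_ner_html_str_alt tokens tags max_tokens
  change legendA ++ "<div>" ++ PySem.Str.join " "
      (loopA (PySem.List.slice tokens none (some max_tokens))
             (PySem.List.slice tags none (some max_tokens))) ++ "</div>" =
    legendB ++ "<div>" ++ PySem.Str.join " "
      ((segsB (PySem.List.slice tokens none (some max_tokens))
              (PySem.List.slice tags none (some max_tokens))).map renderB) ++ "</div>"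
  have hseg : segsB (PySem.List.slice tokens none (some max_tokens))
      (PySem.List.slice tags none (some max_tokens)) =
      segsA (PySem.List.slice tokens none (some max_tokens))
            (PySem.List.slice tags none (some max_tokens)) := by
    rw [segsB_eq_zip _ _ hPre]
    have := foldB_inv (PySem.List.slice tokens none (some max_tokens)).length
      (PySem.List.slice tokens none (some max_tokens))
      (PySem.List.slice tags none (some max_tokens)) [] none (le_refl _) hPre
    simpa [finishB, afterA] using this
  rw [hseg,
    ← loopA_eq_map (PySem.List.slice tokens none (some max_tokens)).length _ _ (le_refl _),
    legendA_eq_legendB]
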